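-- pv_equiv track=rewrite | github.com/4lhelali/Data-Communication- | methods/parity2d.py | parity_2d
-- ===== SOURCE A (Python) =====
-- def parity_2d(text):
--     bits = [f"{ord(c):08b}" for c in text]
--
--     row_parity = []
--     col_parity = [0] * 8
--
--     for row in bits:
--         row_parity.append(str(row.count("1") % 2))
--         for i, bit in enumerate(row):
--             col_parity[i] ^= int(bit)
--
--     return "".join(row_parity) + "".join(str(b) for b in col_parity)
-- ===== SOURCE B (Python) =====
-- def parity_2d(text):
--     codes = [ord(c) for c in text]
--     row_parity = "".join(str(bin(n).count("1") % 2) for n in codes)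
--     col_parity = "".join(
--         str(sum((n >> (7 - i)) & 1 for n in codes) % 2) for i in range(8)
--     )
--     return row_parity + col_parity
-- ===== Notes on version B (the rewrite author's own statement) =====
-- stated objective: faster
-- what changed: A fuses row and column parity in one loop over per-char formatted 8-bit strings with an in-place xor array; B makes two separate passes over the raw integer codes (row parities via bin(n).count popcount, column parities via an outer loop over the 8 bit positions summing shifted bits), never formatting each char to a bit string for the column work.
import Mathlib
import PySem

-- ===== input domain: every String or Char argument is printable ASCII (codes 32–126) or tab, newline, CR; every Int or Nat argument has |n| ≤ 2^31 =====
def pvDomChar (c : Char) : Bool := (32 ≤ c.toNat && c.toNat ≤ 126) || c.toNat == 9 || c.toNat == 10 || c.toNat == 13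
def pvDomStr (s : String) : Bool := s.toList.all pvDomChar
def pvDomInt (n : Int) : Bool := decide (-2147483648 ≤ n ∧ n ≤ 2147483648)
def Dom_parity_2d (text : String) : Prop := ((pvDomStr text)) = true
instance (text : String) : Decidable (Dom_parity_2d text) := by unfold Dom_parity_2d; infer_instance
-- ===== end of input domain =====

-- B is an alternative decomposition: two separate passes (row parities via popcount of each
-- character code, column parities via an outer loop over the 8 bit positions using shifts)
-- instead of A's single fused loop over formatted 8-bit strings with an in-place xor array.

-- ===== PORT A =====
-- f"{n:08b}": binary digits of n (Nat.toDigits 2 = Python's bin digits, MSB first,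
-- '0' for n = 0) left-padded with '0' to width 8; exact for n < 256
def pvBin8 (n : Nat) : List Char :=
  let d := Nat.toDigits 2 n
  List.replicate (8 - d.length) '0' ++ d

-- int(bit): exact here since the bits produced by pvBin8 are only '0' and '1'
def pvIntOfBitChar (c : Char) : Int := if c = '1' then 1 else 0

-- the body of A's loop: append the row parity digit, xor the row into col_parity in place
def pvStepA (st : List (List Char) × List Int) (row : List Char) :
    List (List Char) × List Int :=
  (st.1 ++ [(PySem.Int.toStr ((row.count '1' : Int) % 2)).toList],
   (PySem.List.enumerate row).foldl
     (fun cp ib => PySem.List.pySetD cp ib.1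
       (PySem.Int.bxor (PySem.List.pyGetD cp ib.1 0) (pvIntOfBitChar ib.2))) st.2)

def parity_2d (text : String) : String :=
  let bits := text.toList.map (fun c => pvBin8 c.toNat)
  let st := bits.foldl pvStepA ([], List.replicate 8 0)
  String.mk (st.1.flatten ++ (st.2.map (fun b => (PySem.Int.toStr b).toList)).flatten)

-- ===== PORT B =====
-- bin(n).count("1"): the number of 1 bits of n (first argument is fuel, n itself suffices)
def pvPopcntAux : Nat → Nat → Nat
  | _, 0 => 0
  | 0, _ + 1 => 0
  | f + 1, m + 1 => (m + 1) % 2 + pvPopcntAux f ((m + 1) / 2)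

def pvPopcnt (n : Nat) : Nat := pvPopcntAux n n

def parity_2d_alt (text : String) : String :=
  let codes := text.toList.map Char.toNat
  let rowp := codes.flatMap (fun n => (PySem.Int.toStr ((pvPopcnt n : Int) % 2)).toList)
  let colp := (List.range 8).flatMap (fun i =>
    (PySem.Int.toStr (((codes.foldl (fun s n => s + ((n >>> (7 - i)) &&& 1)) 0 : Nat) : Int) % 2)).toList)
  String.mk (rowp ++ colp)

-- ===== PRECONDITION & SPEC =====
def Spec_parity_2d (text : String) (out : String) : Prop := out = parity_2d_alt text
instance (text : String) (out : String) : Decidable (Spec_parity_2d text out) := by unfold Spec_parity_2d; infer_instance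

-- ===== CLAIM (what is proved, stated in full; the proofs are below) =====
def Claim_equal_parity_2d : Prop := ∀ (text : String), Dom_parity_2d text → Spec_parity_2d text (parity_2d text)

-- ===== LEMMAS AND PROOFS =====

-- bit i (MSB first) of the lowest 8 bits of n
def pvBitOf (n i : Nat) : Nat := (n >>> (7 - i)) &&& 1

set_option maxRecDepth 4000 in
lemma pvBin8_shift : ∀ n ∈ List.range 128,
    pvBin8 n = (List.range 8).map (fun i => if pvBitOf n i = 1 then '1' else '0') := by
  decide

set_option maxRecDepth 4000 in
lemma pvCount_popcnt : ∀ n ∈ List.range 128,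
    (pvBin8 n).count '1' = pvPopcnt n := by
  decide

lemma pvBitOf_lt_two (n i : Nat) : pvBitOf n i < 2 := by
  have : pvBitOf n i = (n >>> (7 - i)) % 2 := Nat.and_one_is_mod _
  omega

-- xor of bit i over the characters of l (Nat form)
def pvXorCol (l : List Char) (i : Nat) : Nat :=
  l.foldr (fun c a => pvBitOf c.toNat i ^^^ a) 0

lemma pvXorCol_sum (l : List Char) (i : Nat) :
    pvXorCol l i = (l.foldr (fun c s => pvBitOf c.toNat i + s) 0) % 2 := by
  induction l with
  | nil => rfl
  | cons c t ih =>
    simp only [pvXorCol, List.foldr_cons] at *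
    rw [ih]
    have hb := pvBitOf_lt_two c.toNat i
    set b := pvBitOf c.toNat i with hbdef
    set s := t.foldr (fun c s => pvBitOf c.toNat i + s) 0 with hsdef
    have hs : s % 2 = 0 ∨ s % 2 = 1 := by omega
    interval_cases b
    · rcases hs with h | h <;> rw [h] <;> simp <;> omega
    · rcases hs with h | h <;> rw [h] <;>
        · have : (1 + s) % 2 = 1 - s % 2 := by omega
          rw [this, h]; decide

-- the inner 'for i, bit in enumerate(row)' loop of A on an explicit 8-slot state
lemma pvInner (c0 c1 c2 c3 c4 c5 c6 c7 : Int) (b0 b1 b2 b3 b4 b5 b6 b7 : Char) :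
    (PySem.List.enumerate [b0, b1, b2, b3, b4, b5, b6, b7]).foldl
      (fun cp ib => PySem.List.pySetD cp ib.1
        (PySem.Int.bxor (PySem.List.pyGetD cp ib.1 0) (pvIntOfBitChar ib.2)))
      [c0, c1, c2, c3, c4, c5, c6, c7] =
    [PySem.Int.bxor c0 (pvIntOfBitChar b0), PySem.Int.bxor c1 (pvIntOfBitChar b1),
     PySem.Int.bxor c2 (pvIntOfBitChar b2), PySem.Int.bxor c3 (pvIntOfBitChar b3),
     PySem.Int.bxor c4 (pvIntOfBitChar b4), PySem.Int.bxor c5 (pvIntOfBitChar b5),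
     PySem.Int.bxor c6 (pvIntOfBitChar b6), PySem.Int.bxor c7 (pvIntOfBitChar b7)] := by
  simp [PySem.List.enumerate, PySem.List.pySetD, PySem.List.pyGetD,
    PySem.List.pyGet?, PySem.List.pyIdx?, PySem.List.pySet?]

-- one step of A's loop on an explicit 8-slot column state
lemma pvStepA_eq (rp : List (List Char)) (c0 c1 c2 c3 c4 c5 c6 c7 : Nat) (n : Nat)
    (hn : n < 128) :
    pvStepA (rp, [(c0 : Int), c1, c2, c3, c4, c5, c6, c7]) (pvBin8 n) =
      (rp ++ [(PySem.Int.toStr (((pvBin8 n).count '1' : Int) % 2)).toList],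
       [((c0 ^^^ pvBitOf n 0 : Nat) : Int), (c1 ^^^ pvBitOf n 1 : Nat), (c2 ^^^ pvBitOf n 2 : Nat),
        (c3 ^^^ pvBitOf n 3 : Nat), (c4 ^^^ pvBitOf n 4 : Nat), (c5 ^^^ pvBitOf n 5 : Nat),
        (c6 ^^^ pvBitOf n 6 : Nat), (c7 ^^^ pvBitOf n 7 : Nat)]) := by
  have h8 : pvBin8 n = [(fun i => if pvBitOf n i = 1 then '1' else '0') 0,
      (fun i => if pvBitOf n i = 1 then '1' else '0') 1, (fun i => if pvBitOf n i = 1 then '1' else '0') 2,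
      (fun i => if pvBitOf n i = 1 then '1' else '0') 3, (fun i => if pvBitOf n i = 1 then '1' else '0') 4,
      (fun i => if pvBitOf n i = 1 then '1' else '0') 5, (fun i => if pvBitOf n i = 1 then '1' else '0') 6,
      (fun i => if pvBitOf n i = 1 then '1' else '0') 7] := pvBin8_shift n (by simpa [List.mem_range] using hn)
  have hbit : ∀ j : Nat, pvIntOfBitChar (if pvBitOf n j = 1 then '1' else '0') =
      ((pvBitOf n j : Nat) : Int) := by
    intro j
    have := pvBitOf_lt_two n j
    interval_cases h : pvBitOf n j <;> simp [pvIntOfBitChar]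
  rw [pvStepA]
  refine Prod.ext rfl ?_
  conv_lhs => rw [h8]
  rw [pvInner]
  simp only [hbit, PySem.Int.bxor_natCast]

-- the main loop of A, characterised
lemma pvLoopA (l : List Char) (hl : ∀ c ∈ l, c.toNat < 128)
    (rp : List (List Char)) (c0 c1 c2 c3 c4 c5 c6 c7 : Nat) :
    (l.map (fun c => pvBin8 c.toNat)).foldl pvStepA
        (rp, [(c0 : Int), c1, c2, c3, c4, c5, c6, c7]) =
      (rp ++ l.map (fun c => (PySem.Int.toStr (((pvBin8 c.toNat).count '1' : Int) % 2)).toList),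
       [((c0 ^^^ pvXorCol l 0 : Nat) : Int), (c1 ^^^ pvXorCol l 1 : Nat), (c2 ^^^ pvXorCol l 2 : Nat),
        (c3 ^^^ pvXorCol l 3 : Nat), (c4 ^^^ pvXorCol l 4 : Nat), (c5 ^^^ pvXorCol l 5 : Nat),
        (c6 ^^^ pvXorCol l 6 : Nat), (c7 ^^^ pvXorCol l 7 : Nat)]) := by
  induction l generalizing rp c0 c1 c2 c3 c4 c5 c6 c7 with
  | nil => simp [pvXorCol]
  | cons c t ih =>
    have hc : c.toNat < 128 := hl c (by simp)
    have ht : ∀ x ∈ t, x.toNat < 128 := fun x hx => hl x (by simp [hx])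
    simp only [List.map_cons, List.foldl_cons]
    rw [pvStepA_eq rp c0 c1 c2 c3 c4 c5 c6 c7 c.toNat hc, ih ht]
    have hx : ∀ j, pvXorCol (c :: t) j = pvBitOf c.toNat j ^^^ pvXorCol t j := fun j => rfl
    simp [hx, Nat.xor_assoc]

lemma pvFoldl_add_eq_foldr (l : List Char) (f : Char → Nat) :
    ∀ s : Nat, l.foldl (fun s c => s + f c) s = s + l.foldr (fun c t => f c + t) 0 := by
  induction l with
  | nil => simp
  | cons a t ih => intro s; simp only [List.foldl_cons, List.foldr_cons, ih]; omega

-- B's column sum over codes, expressed as the foldr used by pvXorCol_sum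
lemma pvSumB_eq (l : List Char) (i : Nat) :
    (l.map Char.toNat).foldl (fun s n => s + ((n >>> (7 - i)) &&& 1)) 0 =
      l.foldr (fun c s => pvBitOf c.toNat i + s) 0 := by
  rw [List.foldl_map]
  simpa [pvBitOf] using pvFoldl_add_eq_foldr l (fun c => pvBitOf c.toNat i) 0

-- ===== VERDICT (by name: the statement is the Claim_ definition above) =====
theorem parity_2d_spec : Claim_equal_parity_2d := by
  intro text hdom
  have hl : ∀ c ∈ text.toList, c.toNat < 128 := by
    intro c hc
    have hall : pvDomStr text = true := hdom
    have := (List.all_eq_true.mp hall) c hc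
    simp only [pvDomChar, Bool.or_eq_true, Bool.and_eq_true, beq_iff_eq,
      decide_eq_true_eq] at this
    omega
  unfold Spec_parity_2d parity_2d parity_2d_alt
  simp only []
  rw [show (List.replicate 8 (0 : Int)) =
      [((0:Nat) : Int), (0:Nat), (0:Nat), (0:Nat), (0:Nat), (0:Nat), (0:Nat), (0:Nat)] from rfl]
  rw [pvLoopA text.toList hl [] 0 0 0 0 0 0 0 0]
  dsimp only []
  congr 1
  congr 1
  · -- row parity part
    rw [List.nil_append, List.flatMap_def, List.map_map]
    congr 1
    apply List.map_congr_left
    intro c hc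
    have := pvCount_popcnt c.toNat (by simpa [List.mem_range] using hl c hc)
    simp [Function.comp, this]
  · -- column parity part
    have hcol : ∀ i : Nat,
        ((0 ^^^ pvXorCol text.toList i : Nat) : Int) =
          (((text.toList.map Char.toNat).foldl (fun s n => s + ((n >>> (7 - i)) &&& 1)) 0 : Nat) : Int) % 2 := by
      intro i
      rw [Nat.zero_xor, pvXorCol_sum, pvSumB_eq]
      push_cast
      omega
    rw [show List.range 8 = [0, 1, 2, 3, 4, 5, 6, 7] from rfl]
    simp only [List.map_cons, List.map_nil, List.flatMap_cons, List.flatMap_nil,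
      List.flatten_cons, List.flatten_nil, List.append_nil]
    rw [hcol 0, hcol 1, hcol 2, hcol 3, hcol 4, hcol 5, hcol 6, hcol 7]
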